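-- pv_equiv track=rewrite | github.com/thenofreeman/exercises | code/constraint-satisfaction-solver-python/main.py | more_constraining_var
-- ===== SOURCE A (Python) =====
-- def more_constraining_var(cs):
--     maxv = -1
--     mcv = None
--
--     for k, v in cs.items():
--         if len(v) > maxv:
--             mcv = k
--             maxv = len(v)
--         elif len(v) == maxv:
--             if k < mcv:
--                 mcv = k
--
--     return mcv
-- ===== SOURCE B (Python) =====
-- def more_constraining_var(cs):
--     if not cs:
--         return None
--     m = max(len(v) for v in cs.values())
--     return min(k for k, v in cs.items() if len(v) == m)
-- ===== Notes on version B (the rewrite author's own statement) =====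
-- stated objective: simpler
-- what changed: Replaces the single running-best scan with explicit tie-break branches by two staged passes: first compute the maximum constraint-list length, then return the smallest key among entries attaining it.
import Mathlib
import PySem

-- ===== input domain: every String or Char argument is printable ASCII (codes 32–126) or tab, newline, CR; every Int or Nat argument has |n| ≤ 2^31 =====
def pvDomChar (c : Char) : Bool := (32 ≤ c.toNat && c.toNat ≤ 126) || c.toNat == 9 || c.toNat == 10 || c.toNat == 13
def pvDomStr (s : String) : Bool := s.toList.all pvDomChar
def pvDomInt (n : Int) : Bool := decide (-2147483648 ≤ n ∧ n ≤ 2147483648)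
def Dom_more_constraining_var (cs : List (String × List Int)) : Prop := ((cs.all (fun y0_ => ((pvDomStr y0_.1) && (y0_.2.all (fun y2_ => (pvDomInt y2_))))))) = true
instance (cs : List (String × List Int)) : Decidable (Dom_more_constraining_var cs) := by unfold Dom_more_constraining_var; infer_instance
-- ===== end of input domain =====

-- B replaces A's single running-best scan (with explicit tie-break branches) by two staged
-- passes: first the maximum constraint-list length, then the smallest key attaining it.


-- ===== PORT A =====
-- the for-loop over cs.items() with running state (maxv, mcv)
def mcvLoop (cs : List (String × List Int)) (maxv : Int) (mcv : Option String) : Option String :=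
  match cs with
  | [] => mcv
  | (k, v) :: rest =>
    if (v.length : Int) > maxv then mcvLoop rest (v.length : Int) (some k)
    else if (v.length : Int) = maxv then
      -- `k < mcv`: mcv is always `some _` here (maxv ≥ 0 forces a prior assignment, so the none branch is unreachable)
      match mcv with
      | some m => if k < m then mcvLoop rest maxv (some k) else mcvLoop rest maxv (some m)
      | none => mcvLoop rest maxv none
    else mcvLoop rest maxv mcv

def more_constraining_var (cs : List (String × List Int)) : Option String :=
  mcvLoop cs (-1) none

-- ===== PORT B =====
-- stage 1: m = max(len(v) for v in cs.values()); stage 2: min(k for k, v in cs.items() if len(v) == m)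
def more_constraining_var_alt (cs : List (String × List Int)) : Option String :=
  if cs.isEmpty then none
  else
    match PySem.List.max? (cs.map (fun kv => (kv.2.length : Int))) (fun x => x) with
    | none => none
    | some m =>
      PySem.List.min? ((cs.filter (fun kv => (kv.2.length : Int) == m)).map (fun kv => kv.1)) (fun x => x)

-- ===== PRECONDITION & SPEC =====
def Spec_more_constraining_var (cs : List (String × List Int)) (out : Option String) : Prop := out = more_constraining_var_alt cs
instance (cs : List (String × List Int)) (out : Option String) : Decidable (Spec_more_constraining_var cs out) := by unfold Spec_more_constraining_var; infer_instance

-- ===== CLAIM (what is proved, stated in full; the proofs are below) =====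
def Claim_equal_more_constraining_var : Prop := ∀ (cs : List (String × List Int)), Dom_more_constraining_var cs → Spec_more_constraining_var cs (more_constraining_var cs)

-- ===== LEMMAS AND PROOFS =====

-- A's loop step on the abstracted state (current best key, current best length)
def mcvStep (acc : String × Int) (x : String × Int) : String × Int :=
  if x.2 > acc.2 then x
  else if x.2 = acc.2 then (if x.1 < acc.1 then x else acc)
  else acc

-- A's loop, once the first element has been consumed, is a fold of mcvStep over (key, length) pairs
lemma mcvLoop_eq_foldl (cs : List (String × List Int)) :
    ∀ (k : String) (n : Int),
      mcvLoop cs n (some k) =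
      some ((cs.map (fun kv => (kv.1, (kv.2.length : Int)))).foldl mcvStep (k, n)).1 := by
  induction cs with
  | nil => intro k n; simp [mcvLoop]
  | cons x rest ih =>
    intro k n
    obtain ⟨k', v'⟩ := x
    simp only [mcvLoop, List.map_cons, List.foldl_cons, mcvStep]
    split_ifs with h1 h2 h3
    · exact ih k' _
    · rw [← h2]; exact ih k' _
    · exact ih k n
    · exact ih k n

-- the fold's second component is the running maximum of the lengths
lemma foldl_mcvStep_snd (qs : List (String × Int)) :
    ∀ (a : String × Int),
      (qs.foldl mcvStep a).2 = qs.foldl (fun acc q => max acc q.2) a.2 := by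
  induction qs with
  | nil => intro a; rfl
  | cons x rest ih =>
    intro a
    simp only [List.foldl_cons, ih]
    congr 1
    unfold mcvStep
    split_ifs with h1 h2 <;> omega

-- the fold's result is one of the scanned pairs
lemma foldl_mcvStep_mem (qs : List (String × Int)) :
    ∀ (a : String × Int), qs.foldl mcvStep a ∈ a :: qs := by
  induction qs with
  | nil => intro a; exact List.mem_cons_self
  | cons x rest ih =>
    intro a
    simp only [List.foldl_cons]
    have hstep : mcvStep a x = a ∨ mcvStep a x = x := by
      unfold mcvStep; split_ifs <;> simp
    rcases List.mem_cons.mp (ih (mcvStep a x)) with h | h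
    · rcases hstep with h2 | h2 <;> rw [h, h2]
      · exact List.mem_cons_self
      · exact List.mem_cons_of_mem _ List.mem_cons_self
    · exact List.mem_cons_of_mem _ (List.mem_cons_of_mem _ h)

-- among scanned pairs whose length equals the fold's maximum, the fold's key is least
lemma foldl_mcvStep_min (qs : List (String × Int)) :
    ∀ (a : String × Int) (q : String × Int), q ∈ a :: qs →
      q.2 = (qs.foldl mcvStep a).2 → (qs.foldl mcvStep a).1 ≤ q.1 := by
  induction qs with
  | nil =>
    intro a q hq hq2
    rw [List.mem_singleton] at hq; subst hq; exact le_refl _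
  | cons x rest ih =>
    intro a q hq hq2
    simp only [List.foldl_cons] at hq2 ⊢
    have hstep : mcvStep a x = a ∨ mcvStep a x = x := by
      unfold mcvStep; split_ifs <;> simp
    have hge : (mcvStep a x).2 ≤ (rest.foldl mcvStep (mcvStep a x)).2 := by
      rw [foldl_mcvStep_snd]
      have h := (PySem.List.le_foldl_max (rest.map (fun q : String × Int => q.2)) (mcvStep a x).2).1
      rw [List.foldl_map] at h
      exact h
    rcases List.mem_cons.mp hq with h | hq'
    · -- q = a
      subst h
      rcases hstep with hs | hs
      · exact ih _ _ (by rw [hs]; exact List.mem_cons_self) hq2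
      · by_cases h1 : x.2 > q.2
        · -- fold's snd ≥ x.2 > q.2 = fold's snd: contradiction
          have hge' : x.2 ≤ (rest.foldl mcvStep (mcvStep q x)).2 :=
            le_of_eq_of_le (congrArg Prod.snd hs).symm hge
          omega
        · by_cases h2 : x.2 = q.2
          · have hle := ih (mcvStep q x) x (by rw [hs]; exact List.mem_cons_self)
              (by rw [h2]; exact hq2)
            have hx1 : x.1 ≤ q.1 := by
              unfold mcvStep at hs
              rw [if_neg h1, if_pos h2] at hs
              split_ifs at hs with h3
              · exact le_of_lt h3
              · rw [hs]
            exact le_trans hle hx1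
          · have ha : mcvStep q x = q := by unfold mcvStep; rw [if_neg h1, if_neg h2]
            have hax : x = q := by rw [← hs, ha]
            exact absurd (congrArg Prod.snd hax) h2
    · rcases List.mem_cons.mp hq' with h | h
      · -- q = x
        subst h
        rcases hstep with hs | hs
        · by_cases h1 : q.2 > a.2
          · have hx : mcvStep a q = q := by unfold mcvStep; rw [if_pos h1]
            have hax : q = a := by rw [← hx, hs]
            rw [hax] at h1; exact absurd h1 (lt_irrefl _)
          · have hge' : a.2 ≤ (rest.foldl mcvStep (mcvStep a q)).2 :=
              le_of_eq_of_le (congrArg Prod.snd hs).symm hge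
            have h2 : q.2 = a.2 := by omega
            have h3 : ¬ q.1 < a.1 := by
              intro h3
              have hx : mcvStep a q = q := by
                unfold mcvStep; rw [if_neg h1, if_pos h2, if_pos h3]
              have hax : q = a := by rw [← hx, hs]
              rw [hax] at h3; exact lt_irrefl _ h3
            have hle := ih (mcvStep a q) a (by rw [hs]; exact List.mem_cons_self)
              (by rw [← h2]; exact hq2)
            exact le_trans hle (le_of_not_gt h3)
        · exact ih _ _ (by rw [hs]; exact List.mem_cons_self) hq2
      · exact ih _ _ (List.mem_cons_of_mem _ h) hq2

-- a nonempty list whose member x is ≤ all members has min x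
lemma min?_eq_of_least {l : List String} {x : String} (hx : x ∈ l)
    (hle : ∀ y ∈ l, x ≤ y) : PySem.List.min? l (fun y => y) = some x := by
  cases l with
  | nil => simp at hx
  | cons h t =>
    obtain ⟨m, hm⟩ : ∃ m, PySem.List.min? (h :: t) (fun y => y) = some m := by
      cases hmm : PySem.List.min? (h :: t) (fun y => y) with
      | none => exact absurd hmm (by simp [PySem.List.min?_eq_none_iff])
      | some m => exact ⟨m, rfl⟩
    rw [hm]
    have hmem := PySem.List.min?_mem hm
    have hmin := PySem.List.min?_isMin hm
    exact congrArg some (le_antisymm (hmin x hx) (hle m hmem))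

-- ===== VERDICT (by name: the statement is the Claim_ definition above) =====
theorem more_constraining_var_spec : Claim_equal_more_constraining_var := by
  intro cs _
  unfold Spec_more_constraining_var more_constraining_var more_constraining_var_alt
  cases cs with
  | nil => rfl
  | cons c rest =>
    obtain ⟨k0, v0⟩ := c
    -- A side: first iteration always takes the first branch (len ≥ 0 > -1)
    have hfirst : mcvLoop ((k0, v0) :: rest) (-1) none
        = mcvLoop rest (v0.length : Int) (some k0) := by
      simp [mcvLoop]; omega
    rw [hfirst, mcvLoop_eq_foldl]
    set g : String × List Int → String × Int := fun kv => (kv.1, (kv.2.length : Int)) with hg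
    set p := ((rest.map g).foldl mcvStep (k0, (v0.length : Int))) with hp
    -- B side: the max? stage
    have hmax : PySem.List.max? (((k0, v0) :: rest).map (fun kv => (kv.2.length : Int))) (fun x => x)
        = some p.2 := by
      rw [List.map_cons, PySem.List.max?_id_cons]
      congr 1
      rw [hp, foldl_mcvStep_snd, List.foldl_map, List.foldl_map]
    simp only [List.isEmpty_cons, Bool.false_eq_true, if_false, hmax]
    -- B side: the filter/min stage
    have hpmem : p ∈ (k0, (v0.length : Int)) :: rest.map g := foldl_mcvStep_mem _ _
    have hleast := foldl_mcvStep_min (rest.map g) (k0, (v0.length : Int))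
    -- the key list B minimises over
    set kl := ((((k0, v0) :: rest).filter (fun kv => (kv.2.length : Int) == p.2)).map (fun kv => kv.1)) with hkl
    have hklchar : kl = (((k0, (v0.length : Int)) :: rest.map g).filter (fun q => q.2 == p.2)).map (fun q => q.1) := by
      rw [hkl]
      have : ((k0, (v0.length : Int)) :: rest.map g) = ((k0, v0) :: rest).map g := by simp [hg]
      rw [this, List.filter_map, List.map_map]
      rfl
    have hpin : p.1 ∈ kl := by
      rw [hklchar]
      exact List.mem_map.mpr ⟨p, List.mem_filter.mpr ⟨hpmem, by simp⟩, rfl⟩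
    have hple : ∀ y ∈ kl, p.1 ≤ y := by
      intro y hy
      rw [hklchar] at hy
      obtain ⟨q, hq, rfl⟩ := List.mem_map.mp hy
      obtain ⟨hqmem, hq2⟩ := List.mem_filter.mp hq
      exact hleast q hqmem (by simpa using hq2)
    exact (min?_eq_of_least hpin hple).symm
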